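-- pv_equiv track=rewrite | github.com/hipe/tmx | script/SSGs/hugo_themes_deep/tags_and_features_reports/report_200_alternatives_and_their_useful_phenomena.py | _build_yes_or_no_via
-- ===== SOURCE A (Python) =====
-- def _build_yes_or_no_via(singeltons, buckets):
--     """
--     from the indexes of phenomena grouped by frequency of association,
--     make a map that tells you per phenomenon simply NO or YES based on if
--     the count of the associations was one or more than one.
--     """
--
--     dct = {}
--     for _count, phenomena in buckets.items():
--         for phenomenon in phenomena:
--             sanity() if phenomenon in dct else None
--             dct[phenomenon] = True
--
--     for phenomena in singeltons:
--         dct[phenomena] = False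
--
--     return dct
--
-- def sanity():
--     raise Exception('sanity')
-- ===== SOURCE B (Python) =====
-- def _build_yes_or_no_via(singeltons, buckets):
--     # Different decomposition/algorithm: duplicates are detected by sorting the
--     # flattened phenomena and scanning adjacent pairs (sort-then-scan instead of
--     # a hash-membership guard); each value is computed directly up front as
--     # "not a singleton" (no overwrite pass), and only brand-new singleton keys
--     # are appended afterwards.
--     flat = [p for phenomena in buckets.values() for p in phenomena]
--     srt = sorted(flat)
--     for x, y in zip(srt, srt[1:]):
--         if x == y:
--             raise Exception('sanity')
--     no = set(singeltons)
--     dct = {p: p not in no for p in flat}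
--     for s in singeltons:
--         if s not in dct:
--             dct[s] = False
--     return dct
-- ===== Notes on version B (the rewrite author's own statement) =====
-- stated objective: alternative
-- what changed: Duplicate detection becomes sort-then-adjacent-scan over the flattened phenomena instead of a per-insert hash membership guard, each value is computed directly as 'not a singleton' so the overwrite pass disappears, and only fresh singleton keys are appended.
import Mathlib
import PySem

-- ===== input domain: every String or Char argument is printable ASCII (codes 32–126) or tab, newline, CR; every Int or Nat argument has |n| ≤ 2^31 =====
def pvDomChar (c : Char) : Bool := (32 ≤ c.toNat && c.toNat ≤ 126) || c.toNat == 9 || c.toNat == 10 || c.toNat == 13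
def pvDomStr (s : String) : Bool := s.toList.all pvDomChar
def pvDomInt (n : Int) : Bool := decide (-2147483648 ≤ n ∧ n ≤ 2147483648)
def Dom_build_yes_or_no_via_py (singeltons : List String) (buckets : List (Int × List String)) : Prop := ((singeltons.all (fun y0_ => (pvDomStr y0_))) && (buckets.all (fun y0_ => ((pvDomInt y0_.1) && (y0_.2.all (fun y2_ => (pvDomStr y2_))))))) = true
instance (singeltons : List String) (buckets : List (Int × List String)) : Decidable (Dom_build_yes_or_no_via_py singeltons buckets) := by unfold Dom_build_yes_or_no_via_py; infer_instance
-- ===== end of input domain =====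

-- B validates uniqueness by sort-then-adjacent-scan over the flattened phenomena and builds
-- each value directly as "not a singleton" (no overwrite pass), appending only fresh singleton keys.


-- ===== PORT A =====
def build_yes_or_no_via_py (singeltons : List String) (buckets : List (Int × List String)) : List (String × Bool) :=
  let dct : PySem.Dict String Bool :=
    buckets.foldl (fun dct pr =>
      pr.2.foldl (fun dct phenomenon =>
        -- 'sanity() if phenomenon in dct else None': Python RAISES on the then-branch;
        -- Pre_ excludes such inputs, the branch value is never claimed about
        if PySem.Dict.contains dct phenomenon then dct
        else PySem.Dict.insert dct phenomenon true) dct) PySem.Dict.empty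
  (singeltons.foldl (fun dct p => PySem.Dict.insert dct p false) dct).items

-- ===== PORT B =====
def build_yes_or_no_via_py_alt (singeltons : List String) (buckets : List (Int × List String)) : List (String × Bool) :=
  let flat : List String := buckets.flatMap (fun pr => pr.2)
  let srt := PySem.List.sorted flat (fun x => x) false
  -- 'for x, y in zip(srt, srt[1:]): if x == y: raise Exception('sanity')' — B raises there; outside Pre_
  if (srt.zip srt.tail).any (fun pr => pr.1 == pr.2) then []
  else
    let no : PySem.Set String := PySem.Set.ofList singeltons
    let dct : PySem.Dict String Bool :=
      flat.foldl (fun d p => PySem.Dict.insert d p (!(PySem.Set.contains no p))) PySem.Dict.empty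
    (singeltons.foldl (fun d s =>
      if PySem.Dict.contains d s then d else PySem.Dict.insert d s false) dct).items

-- ===== PRECONDITION & SPEC =====
-- Pre_ excludes exactly the inputs where a phenomenon occurs twice across the buckets' lists:
-- there A raises Exception('sanity') (and B raises the same exception).
def Pre_build_yes_or_no_via_py (singeltons : List String) (buckets : List (Int × List String)) : Prop :=
  (buckets.flatMap (fun pr => pr.2)).Nodup
instance (singeltons : List String) (buckets : List (Int × List String)) : Decidable (Pre_build_yes_or_no_via_py singeltons buckets) := by unfold Pre_build_yes_or_no_via_py; infer_instance
def pvWitness_build_yes_or_no_via_py : List String × (List (Int × List String)) := (["a", "b"], [(1, ["x", "a"]), (2, ["y"])])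

def Spec_build_yes_or_no_via_py (singeltons : List String) (buckets : List (Int × List String)) (out : List (String × Bool)) : Prop := out = build_yes_or_no_via_py_alt singeltons buckets
instance (singeltons : List String) (buckets : List (Int × List String)) (out : List (String × Bool)) : Decidable (Spec_build_yes_or_no_via_py singeltons buckets out) := by unfold Spec_build_yes_or_no_via_py; infer_instance

-- ===== CLAIM =====
def Claim_equal_build_yes_or_no_via_py : Prop := ∀ (singeltons : List String) (buckets : List (Int × List String)), Dom_build_yes_or_no_via_py singeltons buckets → Pre_build_yes_or_no_via_py singeltons buckets → Spec_build_yes_or_no_via_py singeltons buckets (build_yes_or_no_via_py singeltons buckets)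

-- ===== LEMMAS AND PROOFS =====

-- A's nested fold over the buckets is the fold over the flattened phenomena list.
theorem nested_foldl_eq_flat {α : Type} (step : PySem.Dict String Bool → String → PySem.Dict String Bool)
    (b : List (α × List String)) (d : PySem.Dict String Bool) :
    b.foldl (fun d pr => pr.2.foldl step d) d = (b.flatMap (fun pr => pr.2)).foldl step d := by
  induction b generalizing d with
  | nil => rfl
  | cons hd tl ih => simp [List.foldl_append, ih]

-- When every element of l is fresh for d and l has no duplicates,
-- A's guarded step never takes its then-branch.
theorem guarded_foldl_eq (v : String → Bool) (l : List String) (d : PySem.Dict String Bool)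
    (hfresh : ∀ p ∈ l, d.contains p = false) (hnd : l.Nodup) :
    l.foldl (fun d p => if d.contains p then d else d.insert p (v p)) d
      = l.foldl (fun d p => d.insert p (v p)) d := by
  induction l generalizing d with
  | nil => rfl
  | cons x t ih =>
    have h0 : d.contains x = false := hfresh x List.mem_cons_self
    simp only [List.foldl_cons, h0, Bool.false_eq_true, if_false]
    exact ih (d.insert x (v x)) (fun p hp => by
      rw [PySem.Dict.contains_insert]
      have hne : p ≠ x := fun h => (List.nodup_cons.mp hnd).1 (h ▸ hp)
      simp [hne, hfresh p (List.mem_cons_of_mem _ hp)]) (List.nodup_cons.mp hnd).2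

-- A nodup list has no equal adjacent pair (B's sorted scan fires on no input of Pre_).
theorem no_adjacent_dup (l : List String) (h : l.Nodup) :
    (l.zip l.tail).any (fun pr => pr.1 == pr.2) = false := by
  induction l with
  | nil => rfl
  | cons x t ih =>
    cases t with
    | nil => rfl
    | cons y u =>
      have hxy : x ≠ y := by
        have := (List.nodup_cons.mp h).1
        exact fun he => this (he ▸ List.mem_cons_self)
      simp only [List.tail_cons, List.zip_cons_cons, List.any_cons, Bool.or_eq_false_iff]
      exact ⟨by simp [hxy], by simpa using ih (List.nodup_cons.mp h).2⟩

-- MAIN: A's plain-overwrite singleton pass from d equals B's guarded pass from d', given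
-- equal (nodup) key lists, agreement outside S, and d'-values already false on keys of S.
theorem singleton_pass_eq (S : List String) (d d' : PySem.Dict String Bool)
    (hk : d.keys = d'.keys) (hnd : d.keys.Nodup)
    (hS : ∀ k ∈ S, d'.contains k = true → d'.getD k true = false)
    (hout : ∀ k, k ∉ S → d.getD k true = d'.getD k true) :
    S.foldl (fun d s => d.insert s false) d
      = S.foldl (fun d s => if d.contains s then d else d.insert s false) d' := by
  induction S generalizing d d' with
  | nil =>
    simp only [List.foldl_nil]
    apply PySem.Dict.ext
    rw [PySem.Dict.items_eq_map_keys d hnd true, PySem.Dict.items_eq_map_keys d' (hk ▸ hnd) true, hk]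
    exact List.map_congr_left (fun k _ => by rw [hout k (by simp)])
  | cons s S' ih =>
    simp only [List.foldl_cons]
    have hck : d.contains s = d'.contains s := by
      rw [PySem.Dict.contains_eq_decide_mem_keys, PySem.Dict.contains_eq_decide_mem_keys, hk]
    by_cases hc : d'.contains s = true
    · rw [if_pos hc]
      apply ih (d.insert s false) d'
      · rw [PySem.Dict.keys_insert_of_contains d false (hck.trans hc), hk]
      · rw [PySem.Dict.keys_insert_of_contains d false (hck.trans hc)]; exact hnd
      · exact fun k hkS hc' => hS k (List.mem_cons_of_mem _ hkS) hc'
      · intro k hkn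
        by_cases he : k = s
        · subst he
          rw [PySem.Dict.getD_insert_self, hS _ List.mem_cons_self hc]
        · rw [PySem.Dict.getD_insert_of_ne _ _ _ he]
          exact hout k (by simp [he, hkn])
    · rw [if_neg hc]
      have hc2 : d'.contains s = false := by simpa using hc
      apply ih (d.insert s false) (d'.insert s false)
      · rw [PySem.Dict.keys_insert_of_not_contains d false (hck.trans hc2),
            PySem.Dict.keys_insert_of_not_contains d' false hc2, hk]
      · rw [PySem.Dict.keys_insert_of_not_contains d false (hck.trans hc2)]
        refine List.Nodup.append hnd (by simp) ?_
        intro a ha hb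
        have : a = s := by simpa using hb
        subst this
        have : d.contains a = true := by
          rw [PySem.Dict.contains_eq_decide_mem_keys]; simpa using ha
        rw [hck, hc2] at this; exact absurd this (by simp)
      · intro k hkS hc'
        by_cases he : k = s
        · subst he; rw [PySem.Dict.getD_insert_self]
        · rw [PySem.Dict.contains_insert] at hc'
          rw [PySem.Dict.getD_insert_of_ne _ _ _ he]
          exact hS k (List.mem_cons_of_mem _ hkS) (by simpa [he] using hc')
      · intro k hkn
        by_cases he : k = s
        · subst he; rw [PySem.Dict.getD_insert_self, PySem.Dict.getD_insert_self]
        · rw [PySem.Dict.getD_insert_of_ne _ _ _ he, PySem.Dict.getD_insert_of_ne _ _ _ he]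
          exact hout k (by simp [he, hkn])

-- ===== VERDICT =====
theorem build_yes_or_no_via_py_spec : Claim_equal_build_yes_or_no_via_py := by
  intro singeltons buckets _ hpre
  unfold Spec_build_yes_or_no_via_py build_yes_or_no_via_py build_yes_or_no_via_py_alt
  have hnd : (buckets.flatMap (fun pr => pr.2)).Nodup := hpre
  set flat := buckets.flatMap (fun pr => pr.2) with hflat
  have hsnd : (PySem.List.sorted flat (fun x => x) false).Nodup :=
    (PySem.List.sorted_perm flat (fun x => x) false).nodup_iff.mpr hnd
  rw [if_neg (by simp [no_adjacent_dup _ hsnd])]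
  rw [nested_foldl_eq_flat]
  rw [guarded_foldl_eq (fun _ => true) flat PySem.Dict.empty
      (fun p _ => PySem.Dict.contains_empty p) hnd]
  -- items of both built dicts
  have hA : (flat.foldl (fun d p => d.insert p true) PySem.Dict.empty).items
      = flat.map (fun p => (p, true)) := by
    simpa using PySem.Dict.items_foldl_insert_fresh (k := fun p => p) (v := fun _ => true)
      (d := PySem.Dict.empty) (l := flat) (fun a _ => PySem.Dict.contains_empty a) (by simpa using hnd)
  have hB : (flat.foldl (fun d p => d.insert p (!(PySem.Set.contains (PySem.Set.ofList singeltons) p))) PySem.Dict.empty).items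
      = flat.map (fun p => (p, !(PySem.Set.contains (PySem.Set.ofList singeltons) p))) := by
    simpa using PySem.Dict.items_foldl_insert_fresh (k := fun p => p)
      (v := fun p => !(PySem.Set.contains (PySem.Set.ofList singeltons) p))
      (d := PySem.Dict.empty) (l := flat) (fun a _ => PySem.Dict.contains_empty a) (by simpa using hnd)
  set dA := flat.foldl (fun d p => d.insert p true) PySem.Dict.empty with hdA
  set dB := flat.foldl (fun d p => d.insert p (!(PySem.Set.contains (PySem.Set.ofList singeltons) p))) PySem.Dict.empty with hdB
  have hkA : dA.keys = flat := by simp [PySem.Dict.keys, hA, Function.comp_def]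
  have hkB : dB.keys = flat := by simp [PySem.Dict.keys, hB, Function.comp_def]
  have hkndA : dA.keys.Nodup := by rw [hkA]; exact hnd
  have hkndB : dB.keys.Nodup := by rw [hkB]; exact hnd
  show (singeltons.foldl (fun d p => PySem.Dict.insert d p false) dA).items
      = (singeltons.foldl (fun d s => if PySem.Dict.contains d s then d else PySem.Dict.insert d s false) dB).items
  congr 1
  apply singleton_pass_eq singeltons dA dB (by rw [hkA, hkB]) hkndA
  · intro k hkS hc
    have hkm : k ∈ flat := by
      rw [PySem.Dict.contains_eq_decide_mem_keys, hkB] at hc; simpa using hc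
    have : (k, !(PySem.Set.contains (PySem.Set.ofList singeltons) k)) ∈ dB.items := by
      rw [hB]; exact List.mem_map_of_mem hkm
    rw [PySem.Dict.getD_of_mem_items _ this hkndB]
    simp [PySem.Set.contains, PySem.Set.mem_ofList, hkS]
  · intro k hkn
    by_cases hm : k ∈ flat
    · have h1 : (k, true) ∈ dA.items := by rw [hA]; exact List.mem_map_of_mem hm
      have h2 : (k, !(PySem.Set.contains (PySem.Set.ofList singeltons) k)) ∈ dB.items := by
        rw [hB]; exact List.mem_map_of_mem hm
      rw [PySem.Dict.getD_of_mem_items _ h1 hkndA, PySem.Dict.getD_of_mem_items _ h2 hkndB]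
      simp [PySem.Set.contains, PySem.Set.mem_ofList, hkn]
    · rw [PySem.Dict.getD_of_not_contains, PySem.Dict.getD_of_not_contains]
      · rw [PySem.Dict.contains_eq_decide_mem_keys, hkB]; simpa using hm
      · rw [PySem.Dict.contains_eq_decide_mem_keys, hkA]; simpa using hm
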